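-- pv_equiv track=rewrite | github.com/shivanichauhan18/python-web-scraping | __pycache__/Count_movie_language.py | analyse_movies_language
-- ===== SOURCE A (Python) =====
-- def analyse_movies_language(Language_list,list):
--         dictionary={}
--         for Language in Language_list:
--                 count_language=0
--                 for particular_language in list:
--                         if Language == particular_language:
--                                 count_language=count_language+1
--                 dictionary[Language]=count_language
--         return dictionary
-- ===== SOURCE B (Python) =====
-- def analyse_movies_language(Language_list, list):
--     # One pass over `list` with a pre-seeded dict, instead of a nested languages x list scan.
--     dictionary = {lang: 0 for lang in Language_list}
--     for element in list:
--         if element in dictionary: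
--             dictionary[element] += 1
--     return dictionary
-- ===== Notes on version B (the rewrite author's own statement) =====
-- stated objective: faster
-- what changed: Replaces the nested languages-by-list counting loop with a dict seeded at zero for each language and a single pass over `list` that increments the matching key.
import Mathlib
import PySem

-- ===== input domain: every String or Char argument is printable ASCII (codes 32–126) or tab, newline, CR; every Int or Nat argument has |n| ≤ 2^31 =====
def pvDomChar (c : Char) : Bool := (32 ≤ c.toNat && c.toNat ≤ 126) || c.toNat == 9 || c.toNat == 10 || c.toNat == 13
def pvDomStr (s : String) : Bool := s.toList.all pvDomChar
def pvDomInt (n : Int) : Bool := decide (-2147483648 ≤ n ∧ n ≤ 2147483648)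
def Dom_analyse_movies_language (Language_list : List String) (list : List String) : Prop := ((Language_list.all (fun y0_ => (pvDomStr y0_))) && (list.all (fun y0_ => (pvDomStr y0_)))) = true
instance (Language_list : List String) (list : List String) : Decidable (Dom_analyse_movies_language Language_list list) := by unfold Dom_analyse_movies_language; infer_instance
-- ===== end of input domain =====

-- B seeds a zero-count dict from Language_list and makes a single pass over `list`,
-- replacing A's nested languages×list counting loop (objective: faster).


-- ===== PORT A =====
def analyse_movies_language (Language_list : List String) (list : List String) : List (String × Int) :=
  (Language_list.foldl
    (fun (d : PySem.Dict String Int) Language =>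
      d.insert Language
        (list.foldl
          (fun count_language particular_language =>
            if Language == particular_language then count_language + 1 else count_language)
          (0 : Int)))
    PySem.Dict.empty).items

-- ===== PORT B =====
def analyse_movies_language_alt (Language_list : List String) (list : List String) : List (String × Int) :=
  let dictionary : PySem.Dict String Int :=
    Language_list.foldl (fun d lang => d.insert lang 0) PySem.Dict.empty
  (list.foldl
    (fun d element => if d.contains element then d.modify element 0 (· + 1) else d)
    dictionary).items

-- ===== PRECONDITION & SPEC =====
def Spec_analyse_movies_language (Language_list : List String) (list : List String) (out : List (String × Int)) : Prop := out = analyse_movies_language_alt Language_list list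
instance (Language_list : List String) (list : List String) (out : List (String × Int)) : Decidable (Spec_analyse_movies_language Language_list list out) := by unfold Spec_analyse_movies_language; infer_instance

-- ===== CLAIM (what is proved, stated in full; the proofs are below) =====
def Claim_equal_analyse_movies_language : Prop := ∀ (Language_list : List String) (list : List String), Dom_analyse_movies_language Language_list list → Spec_analyse_movies_language Language_list list (analyse_movies_language Language_list list)

-- ===== LEMMAS AND PROOFS =====

-- a fold inserting (cnt lang) for each lang: final value at k is cnt k if k ∈ L, else untouched
theorem getD_foldl_insert_fun (L : List String) (cnt : String → Int) (d : PySem.Dict String Int) (k : String) :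
    (L.foldl (fun d lang => d.insert lang (cnt lang)) d).getD k 0
      = if k ∈ L then cnt k else d.getD k 0 := by
  induction L generalizing d with
  | nil => simp
  | cons a L ih =>
    simp only [List.foldl_cons, ih, PySem.Dict.getD_insert, List.mem_cons]
    by_cases hL : k ∈ L <;> by_cases ha : k = a <;> simp [hL, ha]

-- B's counting pass never changes the key list …
theorem keys_count_loop (l : List String) (d : PySem.Dict String Int) :
    (l.foldl (fun d element => if d.contains element then d.modify element 0 (· + 1) else d) d).keys
      = d.keys := by
  induction l generalizing d with
  | nil => rfl
  | cons x xs ih =>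
    simp only [List.foldl_cons]
    rw [ih]
    by_cases hx : d.contains x
    · rw [if_pos hx, PySem.Dict.keys_modify,
        PySem.Dict.keys_insert_of_contains d _ hx]
    · rw [if_neg (by simp [hx])]

-- … hence it preserves contains at every key
theorem contains_step (d : PySem.Dict String Int) (x k : String) :
    ((if d.contains x then d.modify x 0 (· + 1) else d) : PySem.Dict String Int).contains k
      = d.contains k := by
  by_cases hx : d.contains x
  · simp only [hx, if_pos, PySem.Dict.contains_modify]
    by_cases hk : k = x <;> simp [hk, hx]
  · simp [hx]

-- … and adds, at each key k already present, the number of occurrences of k in l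
theorem getD_count_loop (l : List String) (d : PySem.Dict String Int) (k : String) :
    (l.foldl (fun d element => if d.contains element then d.modify element 0 (· + 1) else d) d).getD k 0
      = d.getD k 0 + (if d.contains k then (l.count k : Int) else 0) := by
  induction l generalizing d with
  | nil => simp
  | cons x l ih =>
    simp only [List.foldl_cons, ih, contains_step]
    by_cases hx : d.contains x
    · simp only [hx, if_pos]
      by_cases hk : k = x
      · subst hk
        simp only [PySem.Dict.getD_modify_self, hx, if_pos, List.count_cons_self]
        push_cast; ring
      · rw [PySem.Dict.getD_modify_of_ne d 0 _ hk,
          List.count_cons_of_ne (fun h => hk h.symm)]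
    · rw [if_neg (by simp [hx])]
      by_cases hk : d.contains k
      · have hkx : k ≠ x := fun h => by rw [h] at hk; exact absurd hk (by simp [hx])
        rw [List.count_cons_of_ne (fun h => hkx h.symm)]
      · simp [hk]

-- the inner counting fold of A is List.count
theorem foldl_eq_count (k : String) (l : List String) :
    (l.foldl (fun c p => if k == p then c + 1 else c) (0 : Int)) = (l.count k : Int) := by
  rw [PySem.List.foldl_count_if (fun p => k == p) l 0, List.count_eq_countP]
  norm_num
  apply List.countP_congr
  intro a _
  constructor <;> intro h <;> exact beq_iff_eq.2 (beq_iff_eq.1 h).symm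

-- ===== VERDICT (by name: the statement is the Claim_ definition above) =====
theorem analyse_movies_language_spec : Claim_equal_analyse_movies_language := by
  intro L l _
  unfold Spec_analyse_movies_language analyse_movies_language analyse_movies_language_alt
  set dA := L.foldl (fun (d : PySem.Dict String Int) Language =>
      d.insert Language (l.foldl (fun c p => if Language == p then c + 1 else c) (0 : Int)))
      PySem.Dict.empty with hdA
  set d0 := L.foldl (fun (d : PySem.Dict String Int) lang => d.insert lang 0) PySem.Dict.empty with hd0
  set dB := l.foldl (fun (d : PySem.Dict String Int) element =>
      if d.contains element then d.modify element 0 (· + 1) else d) d0 with hdB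
  have hkeysA : dA.keys = PySem.Set.update PySem.Dict.empty.keys L :=
    PySem.Dict.keys_foldl_insert L _ _
  have hkeys0 : d0.keys = PySem.Set.update PySem.Dict.empty.keys L :=
    PySem.Dict.keys_foldl_insert L _ _
  have hkeysB : dB.keys = dA.keys := by
    rw [hdB, keys_count_loop, hkeys0, hkeysA]
  have hndA : dA.keys.Nodup :=
    PySem.Dict.nodup_keys_foldl_insert L _ _ PySem.Dict.nodup_keys_empty
  have hndB : dB.keys.Nodup := by rw [hkeysB]; exact hndA
  rw [PySem.Dict.items_eq_map_keys dA hndA 0, PySem.Dict.items_eq_map_keys dB hndB 0, hkeysB]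
  refine (List.map_congr_left ?_).symm
  intro k hk
  have hkL : k ∈ L := by
    rw [hkeysA] at hk
    rw [show (PySem.Dict.empty : PySem.Dict String Int).keys = [] from rfl,
      PySem.Set.update_nil_left L] at hk
    exact (PySem.Set.mem_ofList L k).1 hk
  have hA : dA.getD k 0 = (l.count k : Int) := by
    rw [hdA,
      getD_foldl_insert_fun L (fun lang => l.foldl (fun c p => if lang == p then c + 1 else c) 0)
        PySem.Dict.empty k,
      if_pos hkL, foldl_eq_count]
  have hcont0 : d0.contains k = true :=
    (PySem.Dict.contains_iff_mem_keys d0 k).2 (by rw [hkeys0, ← hkeysA]; exact hk)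
  have h0 : d0.getD k 0 = 0 := by
    rw [hd0, getD_foldl_insert_fun L (fun _ => 0) PySem.Dict.empty k]
    by_cases h : k ∈ L <;> simp [h]
  have hB : dB.getD k 0 = (l.count k : Int) := by
    rw [hdB, getD_count_loop l d0 k, h0, if_pos hcont0]
    ring
  simp [hA, hB]
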